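-- pv_equiv track=rewrite | github.com/ongThien/tira_spring2025 | week3/increasing.py | count_sublists
-- ===== SOURCE A (Python) =====
-- def count_sublists(numbers):
--     n = len(numbers)
--     total = n  # sublists of length 1 are counted too
--
--     i = 1
--     cnt = 0
--     while i < n:
--         if numbers[i] > numbers[i - 1]:
--             cnt += 1
--         else:
--             cnt = 0
--         total += cnt
--         i += 1
--
--     return total
-- ===== SOURCE B (Python) =====
-- def count_sublists(numbers):
--     # Partition into maximal strictly-increasing runs, then sum L*(L+1)//2 per run.
--     runs = []
--     run = 0
--     prev = None
--     for x in numbers: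
--         if run > 0 and x > prev:
--             run += 1
--         else:
--             if run > 0:
--                 runs.append(run)
--             run = 1
--         prev = x
--     if run > 0:
--         runs.append(run)
--     return sum(L * (L + 1) // 2 for L in runs)
-- ===== Notes on version B (the rewrite author's own statement) =====
-- stated objective: alternative
-- what changed: B partitions the list into maximal strictly-increasing runs and returns the sum of L*(L+1)//2 over run lengths, instead of A's running counter of increasing extensions added step by step.
import Mathlib
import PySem

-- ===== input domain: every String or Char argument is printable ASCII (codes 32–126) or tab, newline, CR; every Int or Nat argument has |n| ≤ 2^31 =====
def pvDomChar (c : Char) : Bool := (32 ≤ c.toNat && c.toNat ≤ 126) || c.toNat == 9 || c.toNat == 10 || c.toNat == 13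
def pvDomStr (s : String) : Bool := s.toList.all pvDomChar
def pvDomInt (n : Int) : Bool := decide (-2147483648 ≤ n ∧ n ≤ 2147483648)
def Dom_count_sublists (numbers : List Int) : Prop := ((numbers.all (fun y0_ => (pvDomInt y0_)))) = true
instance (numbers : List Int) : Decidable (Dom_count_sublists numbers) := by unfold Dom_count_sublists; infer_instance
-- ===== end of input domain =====

-- B counts the same total by decomposing the list into maximal strictly-increasing runs
-- and summing L*(L+1)//2 per run (alternative decomposition; same O(n) cost).

-- ===== PORT A =====
-- the while loop of A; indices i are 1 ≤ i, always in range when dereferenced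
def countLoopA (numbers : List Int) (i : Nat) (cnt total : Int) : Int :=
  if _h : i < numbers.length then
    let c := if PySem.List.pyGetD numbers ((i : Int) - 1) 0 < PySem.List.pyGetD numbers (i : Int) 0
             then cnt + 1 else 0
    countLoopA numbers (i + 1) c (total + c)
  else total
termination_by numbers.length - i

def count_sublists (numbers : List Int) : Int :=
  countLoopA numbers 1 0 (numbers.length : Int)

-- ===== PORT B =====
-- one step of B's for-loop: state (runs, run, prev)
def runStepB (s : List Int × Int × Option Int) (x : Int) : List Int × Int × Option Int :=
  if decide (0 < s.2.1) && s.2.2.elim false (fun p => decide (p < x)) then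
    (s.1, s.2.1 + 1, some x)
  else
    ((if 0 < s.2.1 then s.1 ++ [s.2.1] else s.1), 1, some x)

def count_sublists_alt (numbers : List Int) : Int :=
  let s := numbers.foldl runStepB ([], 0, none)
  let runs := if 0 < s.2.1 then s.1 ++ [s.2.1] else s.1
  (runs.map (fun L => PySem.Int.floordiv (L * (L + 1)) 2)).sum

-- ===== PRECONDITION & SPEC =====
def Spec_count_sublists (numbers : List Int) (out : Int) : Prop := out = count_sublists_alt numbers
instance (numbers : List Int) (out : Int) : Decidable (Spec_count_sublists numbers out) := by unfold Spec_count_sublists; infer_instance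

-- ===== CLAIM (what is proved, stated in full; the proofs are below) =====
def Claim_equal_count_sublists : Prop := ∀ (numbers : List Int), Dom_count_sublists numbers → Spec_count_sublists numbers (count_sublists numbers)

-- ===== LEMMAS AND PROOFS =====

-- triangle number via Python floor division
def triPV (L : Int) : Int := PySem.Int.floordiv (L * (L + 1)) 2

lemma triPV_succ (c : Int) : triPV (c + 1) = triPV c + (c + 1) := by
  obtain ⟨k, hk⟩ := (Int.even_mul_succ_self c)
  have h1 : c * (c + 1) = 2 * k := by omega
  have h2 : (c + 1) * ((c + 1) + 1) = 2 * (k + c + 1) := by linear_combination hk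
  unfold triPV
  rw [h1, h2, PySem.Int.floordiv_eq_ediv_of_pos (by omega), PySem.Int.floordiv_eq_ediv_of_pos (by omega),
      Int.mul_ediv_cancel_left _ (by omega), Int.mul_ediv_cancel_left _ (by omega)]
  ring

lemma triPV_one : triPV 1 = 1 := by decide

-- A's loop seen structurally: remaining contribution of the suffix, cnt carried along
def gA (prev cnt : Int) : List Int → Int
  | [] => 0
  | x :: xs => (if prev < x then cnt + 1 else 0) + gA x (if prev < x then cnt + 1 else 0) xs

-- B's remaining total from state (prev, current run length L > 0)
def bR (prev L : Int) : List Int → Int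
  | [] => triPV L
  | x :: xs => if prev < x then bR x (L + 1) xs else triPV L + bR x 1 xs

lemma countLoopA_eq (xs : List Int) : ∀ (pre : List Int) (p cnt total : Int),
    countLoopA (pre ++ p :: xs) (pre.length + 1) cnt total = total + gA p cnt xs := by
  induction xs with
  | nil =>
    intro pre p cnt total
    rw [countLoopA]
    simp [gA]
  | cons x rest ih =>
    intro pre p cnt total
    rw [countLoopA]
    have hlen : pre.length + 1 < (pre ++ p :: x :: rest).length := by simp
    rw [dif_pos hlen]
    have hip : ((pre.length + 1 : Nat) : Int) - 1 = ((pre.length : Nat) : Int) := by push_cast; ring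
    have hgp : PySem.List.pyGetD (pre ++ p :: x :: rest) ((pre.length : Nat) : Int) 0 = p := by
      rw [PySem.List.pyGetD_natCast]
      simp [List.getD]
    have hgx : PySem.List.pyGetD (pre ++ p :: x :: rest) ((pre.length + 1 : Nat) : Int) 0 = x := by
      rw [PySem.List.pyGetD_natCast]
      simp [List.getD]
    have hrec : ∀ c t : Int,
        countLoopA (pre ++ p :: x :: rest) (pre.length + 1 + 1) c t = t + gA x c rest := by
      intro c t
      have h2 : pre ++ p :: x :: rest = (pre ++ [p]) ++ x :: rest := by simp
      have h3 : pre.length + 1 + 1 = (pre ++ [p]).length + 1 := by simp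
      rw [h2, h3, ih (pre ++ [p]) x c t]
    simp only [hip, hgp, hgx]
    by_cases hpx : p < x
    · rw [if_pos hpx, hrec]
      simp [gA, hpx]
      ring
    · rw [if_neg hpx, hrec]
      simp [gA, hpx]

-- B's fold with an open run (run > 0, prev = some p) finishes as accumulated runs + bR
lemma foldB_eq (xs : List Int) : ∀ (runs : List Int) (run p : Int), 0 < run →
    (let s := xs.foldl runStepB (runs, run, some p)
     ((if 0 < s.2.1 then s.1 ++ [s.2.1] else s.1).map (fun L => PySem.Int.floordiv (L * (L + 1)) 2)).sum)
    = (runs.map (fun L => PySem.Int.floordiv (L * (L + 1)) 2)).sum + bR p run xs := by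
  induction xs with
  | nil =>
    intro runs run p hrun
    simp [List.foldl, if_pos hrun, bR, triPV]
  | cons x rest ih =>
    intro runs run p hrun
    simp only [List.foldl]
    by_cases hpx : p < x
    · have hs : runStepB (runs, run, some p) x = (runs, run + 1, some x) := by
        simp [runStepB, hrun, hpx]
      rw [hs, ih runs (run + 1) x (by omega)]
      simp [bR, hpx]
    · have hs : runStepB (runs, run, some p) x = (runs ++ [run], 1, some x) := by
        simp [runStepB, hpx, hrun]
      rw [hs, ih (runs ++ [run]) 1 x (by omega)]
      simp [bR, hpx, triPV]
      ring

-- the bridge: A's structural count from state cnt equals B's run total from run length cnt+1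
lemma gA_bR (xs : List Int) : ∀ (p cnt : Int), 0 ≤ cnt →
    (xs.length : Int) + gA p cnt xs + triPV (cnt + 1) = bR p (cnt + 1) xs := by
  induction xs with
  | nil => intro p cnt _; simp [gA, bR]
  | cons x rest ih =>
    intro p cnt hcnt
    by_cases hpx : p < x
    · have hIH := ih x (cnt + 1) (by omega)
      have hT : triPV (cnt + 1 + 1) = triPV (cnt + 1) + (cnt + 1 + 1) := triPV_succ (cnt + 1)
      simp only [gA, bR, if_pos hpx, List.length_cons]
      push_cast at hIH ⊢
      omega
    · have hIH := ih x 0 (by omega)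
      simp only [zero_add, triPV_one] at hIH
      simp only [gA, bR, if_neg hpx, List.length_cons]
      push_cast at hIH ⊢
      omega

lemma count_eq (numbers : List Int) : count_sublists numbers = count_sublists_alt numbers := by
  cases numbers with
  | nil =>
    rw [count_sublists, countLoopA]
    simp [count_sublists_alt]
  | cons x0 xs =>
    have hA : count_sublists (x0 :: xs) = ((x0 :: xs).length : Int) + gA x0 0 xs := by
      have h := countLoopA_eq xs [] x0 0 ((x0 :: xs).length : Int)
      simpa [count_sublists] using h
    have hB : count_sublists_alt (x0 :: xs) = bR x0 1 xs := by
      have hstep : runStepB ([], 0, none) x0 = ([], 1, some x0) := by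
        simp [runStepB]
      have h := foldB_eq xs [] 1 x0 (by omega)
      simp only [count_sublists_alt, List.foldl]
      rw [hstep]
      simpa using h
    have hbr := gA_bR xs x0 0 (le_refl 0)
    simp only [zero_add, triPV_one] at hbr
    rw [hA, hB]
    simp only [List.length_cons] at hbr ⊢
    push_cast at hbr ⊢
    omega

-- ===== VERDICT (by name: the statement is the Claim_ definition above) =====
theorem count_sublists_spec : Claim_equal_count_sublists := by
  intro numbers _
  unfold Spec_count_sublists
  exact count_eq numbers
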